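-- pv_equiv track=rewrite | github.com/Sagi-BA/AutoBooker | utils/book_creation.py | organize_content
-- ===== SOURCE A (Python) =====
-- def organize_content(edited_texts, chapters):
--     organized_content = {chapter: "" for chapter in chapters}
--     texts_per_chapter = len(edited_texts) // len(chapters)
--
--     for i, chapter in enumerate(chapters):
--         start = i * texts_per_chapter
--         end = start + texts_per_chapter if i < len(chapters) - 1 else len(edited_texts)
--         chapter_texts = [text['text'] for text in edited_texts[start:end]]
--         organized_content[chapter] = "\n\n".join(chapter_texts)
--
--     return organized_content
-- ===== SOURCE B (Python) =====
-- def organize_content(edited_texts, chapters):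
--     organized_content = {chapter: "" for chapter in chapters}
--     tpc = len(edited_texts) // len(chapters)
--     remaining = edited_texts
--     for chapter in chapters[:-1]:
--         organized_content[chapter] = "\n\n".join(t['text'] for t in remaining[:tpc])
--         remaining = remaining[tpc:]
--     organized_content[chapters[-1]] = "\n\n".join(t['text'] for t in remaining)
--     return organized_content
-- ===== Notes on version B (the rewrite author's own statement) =====
-- stated objective: alternative
-- what changed: Replaces per-chapter index arithmetic (start/end computed from enumerate(chapters) and sliced out of edited_texts) with a consume-the-remainder pass: each non-last chapter takes the next tpc texts off the front of a shrinking remainder and the last chapter takes whatever is left.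
import Mathlib
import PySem

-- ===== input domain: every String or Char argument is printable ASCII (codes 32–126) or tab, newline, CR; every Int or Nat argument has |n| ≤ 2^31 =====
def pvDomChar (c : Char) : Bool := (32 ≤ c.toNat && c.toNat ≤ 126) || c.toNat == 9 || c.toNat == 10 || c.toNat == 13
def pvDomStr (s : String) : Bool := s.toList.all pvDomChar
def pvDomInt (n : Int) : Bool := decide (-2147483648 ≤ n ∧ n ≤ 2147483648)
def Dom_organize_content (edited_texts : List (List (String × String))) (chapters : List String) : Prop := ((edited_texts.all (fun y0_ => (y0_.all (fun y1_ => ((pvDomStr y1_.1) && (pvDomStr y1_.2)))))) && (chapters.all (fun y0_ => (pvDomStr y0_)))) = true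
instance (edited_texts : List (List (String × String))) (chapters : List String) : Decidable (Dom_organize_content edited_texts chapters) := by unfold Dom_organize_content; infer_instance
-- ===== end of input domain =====

-- B replaces A's per-chapter index arithmetic (enumerate + start/end slicing) with a single
-- consume-the-remainder pass; return values proved equal on Pre_ (chapters nonempty, 'text' keys present).

-- text['text'] (both Pythons perform this same dict lookup; raises KeyError when absent — excluded by Pre_)
def pvGetText (t : List (String × String)) : String :=
  ((PySem.Dict.mk t).get? "text").getD ""

-- ===== PORT A =====
def organize_content (edited_texts : List (List (String × String))) (chapters : List String) : List (String × String) :=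
  let d0 : PySem.Dict String String := chapters.foldl (fun d ch => d.insert ch "") PySem.Dict.empty
  let tpc : Int := PySem.Int.floordiv (edited_texts.length : Int) (chapters.length : Int)
  ((PySem.List.enumerate chapters 0).foldl (fun d p =>
      d.insert p.2 (PySem.Str.join "\n\n"
        ((PySem.List.slice edited_texts (some (p.1 * tpc))
            (some (if p.1 < (chapters.length : Int) - 1 then p.1 * tpc + tpc else (edited_texts.length : Int)))).map pvGetText))) d0).items

-- ===== PORT B =====
def organize_content_alt (edited_texts : List (List (String × String))) (chapters : List String) : List (String × String) :=
  let d0 : PySem.Dict String String := chapters.foldl (fun d ch => d.insert ch "") PySem.Dict.empty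
  let tpc : Int := PySem.Int.floordiv (edited_texts.length : Int) (chapters.length : Int)
  let st := (PySem.List.slice chapters none (some (-1))).foldl
      (fun (st : PySem.Dict String String × List (List (String × String))) ch =>
        (st.1.insert ch (PySem.Str.join "\n\n" ((PySem.List.slice st.2 none (some tpc)).map pvGetText)),
         PySem.List.slice st.2 (some tpc) none)) (d0, edited_texts)
  (st.1.insert ((PySem.List.pyGet? chapters (-1)).getD "")
      (PySem.Str.join "\n\n" (st.2.map pvGetText))).items

-- ===== PRECONDITION & SPEC =====
-- A raises ZeroDivisionError when chapters == [] and KeyError when some text lacks the 'text' key.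
def Pre_organize_content (edited_texts : List (List (String × String))) (chapters : List String) : Prop :=
  chapters ≠ [] ∧ ∀ t ∈ edited_texts, ((PySem.Dict.mk t).get? "text").isSome = true
instance (edited_texts : List (List (String × String))) (chapters : List String) : Decidable (Pre_organize_content edited_texts chapters) := by unfold Pre_organize_content; infer_instance
def pvWitness_organize_content : (List (List (String × String))) × List String :=
  ([[("text", "hello")], [("text", "world")], [("text", "again")]], ["c1", "c2"])

def Spec_organize_content (edited_texts : List (List (String × String))) (chapters : List String) (out : List (String × String)) : Prop := out = organize_content_alt edited_texts chapters
instance (edited_texts : List (List (String × String))) (chapters : List String) (out : List (String × String)) : Decidable (Spec_organize_content edited_texts chapters out) := by unfold Spec_organize_content; infer_instance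

-- ===== CLAIM (what is proved, stated in full; the proofs are below) =====
def Claim_equal_organize_content : Prop := ∀ (edited_texts : List (List (String × String))) (chapters : List String), Dom_organize_content edited_texts chapters → Pre_organize_content edited_texts chapters → Spec_organize_content edited_texts chapters (organize_content edited_texts chapters)

-- ===== LEMMAS AND PROOFS =====

-- Loop invariant: A's fold over enumerate(l, j) from dict d equals B's fold over l from
-- (d, texts.drop (j*m)), and B's remainder ends at texts.drop ((j+len l)*m), provided every
-- index j..j+len l-1 is strictly below kk-1 (i.e. j + len l + 1 = kk).
theorem pvLoopEq (texts : List (List (String × String))) (m kk : Nat) :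
    ∀ (l : List String) (j : Nat) (d : PySem.Dict String String), j + l.length + 1 = kk →
    ((PySem.List.enumerate l (j : Int)).foldl (fun d p =>
        d.insert p.2 (PySem.Str.join "\n\n"
          ((PySem.List.slice texts (some (p.1 * (m : Int)))
              (some (if p.1 < (kk : Int) - 1 then p.1 * (m : Int) + (m : Int) else (texts.length : Int)))).map pvGetText))) d,
      texts.drop ((j + l.length) * m))
    = l.foldl (fun (st : PySem.Dict String String × List (List (String × String))) ch =>
        (st.1.insert ch (PySem.Str.join "\n\n" ((PySem.List.slice st.2 none (some (m : Int))).map pvGetText)),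
         PySem.List.slice st.2 (some (m : Int)) none)) (d, texts.drop (j * m)) := by
  intro l
  induction l with
  | nil => intro j d h; simp [PySem.List.enumerate]
  | cons ch t ih =>
      intro j d h
      simp only [List.length_cons] at h
      rw [PySem.List.enumerate_cons]
      simp only [List.foldl_cons, List.length_cons]
      rw [PySem.List.slice_to_natCast, PySem.List.slice_from_natCast]
      rw [if_pos (show (j : Int) < (kk : Int) - 1 by omega)]
      have hsl : PySem.List.slice texts (some ((j : Int) * (m : Int))) (some ((j : Int) * (m : Int) + (m : Int)))
          = (texts.drop (j * m)).take m := by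
        have := PySem.List.slice_natCast_add texts (j * m) m
        push_cast at this ⊢
        exact this
      rw [hsl]
      have hdd : (texts.drop (j * m)).drop m = texts.drop ((j + 1) * m) := by
        rw [List.drop_drop]; ring_nf
      have hcast : ((j : Int) + 1) = ((j + 1 : Nat) : Int) := by push_cast; ring
      rw [hcast, hdd]
      have harith : j + (t.length + 1) = (j + 1) + t.length := by omega
      rw [harith]
      exact ih (j + 1) _ (by omega)

-- ===== VERDICT (by name: the statement is the Claim_ definition above) =====
theorem organize_content_spec : Claim_equal_organize_content := by
  intro texts chapters _hdom hpre
  obtain ⟨hne, -⟩ := hpre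
  unfold Spec_organize_content organize_content organize_content_alt
  obtain ⟨l, last, hch⟩ : ∃ l last, chapters = l ++ [last] :=
    ⟨chapters.dropLast, chapters.getLast hne, (List.dropLast_append_getLast hne).symm⟩
  subst hch
  rw [PySem.List.slice_to_neg_one, List.dropLast_concat, PySem.List.pyGet?_neg_one_append_singleton]
  simp only [PySem.Int.floordiv_natCast]
  set kk : Nat := (l ++ [last]).length with hkkdef
  set m : Nat := texts.length / kk with hmdef
  set d0 : PySem.Dict String String := (l ++ [last]).foldl (fun d ch => d.insert ch "") PySem.Dict.empty with hd0
  have hkk1 : kk = l.length + 1 := by simp [hkkdef]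
  have hmain := pvLoopEq texts m kk l 0 d0 (by omega)
  simp only [Nat.cast_zero, Nat.zero_mul, Nat.zero_add, List.drop_zero] at hmain
  rw [← hmain]
  simp only [Option.getD_some]
  rw [PySem.List.enumerate_append, PySem.List.enumerate_cons, PySem.List.enumerate_nil,
    List.foldl_append, List.foldl_cons, List.foldl_nil]
  simp only [zero_add]
  rw [if_neg (show ¬ ((l.length : Int) < (kk : Int) - 1) by omega)]
  have hslA : PySem.List.slice texts (some ((l.length : Int) * (m : Int))) (some (texts.length : Int))
      = texts.drop (l.length * m) := by
    have h := PySem.List.slice_natCast texts (l.length * m) texts.length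
    push_cast at h
    rw [h, List.take_of_length_le (by simp)]
  rw [hslA]
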